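-- pv_equiv track=rewrite | github.com/ashbeekim/algorithms-and-structures | baekjoon/python3/step_6.py | checkGroupWord
-- ===== SOURCE A (Python) =====
-- def checkGroupWord(letter):
--     letters, res = [], 0
--     for idx, char in enumerate(letter):
--         if char in letters:
--             if letter[idx-1]==char:
--                 pass
--             else:
--                 res+=1
--                 break
--         else:
--             letters.append(char)
--     return 0 if res else 1
-- ===== SOURCE B (Python) =====
-- def checkGroupWord(letter):
--     # Phase 1: collapse consecutive duplicate letters into the run sequence.
--     runs = []
--     for c in letter:
--         if not runs or runs[-1] != c:
--             runs.append(c)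
--     # Phase 2: the word is a group word iff all runs use distinct letters.
--     return 1 if len(runs) == len(set(runs)) else 0
-- ===== Notes on version B (the rewrite author's own statement) =====
-- stated objective: simpler
-- what changed: Replaces A's interleaved seen-list scan with early break by two separate phases: first collapse consecutive duplicates into the run sequence, then test that the runs are pairwise distinct via len(set).
import Mathlib
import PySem

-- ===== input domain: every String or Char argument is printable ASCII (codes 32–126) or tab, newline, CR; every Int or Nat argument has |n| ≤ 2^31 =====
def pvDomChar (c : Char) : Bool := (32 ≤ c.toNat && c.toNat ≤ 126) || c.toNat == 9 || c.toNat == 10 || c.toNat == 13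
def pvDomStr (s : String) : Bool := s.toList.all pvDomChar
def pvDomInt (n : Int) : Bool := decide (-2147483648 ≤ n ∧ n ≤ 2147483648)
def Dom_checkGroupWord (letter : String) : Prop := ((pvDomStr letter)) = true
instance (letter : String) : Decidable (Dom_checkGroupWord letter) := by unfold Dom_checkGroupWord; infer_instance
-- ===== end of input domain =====

-- B replaces A's single scan (seen-set + previous-char check with early break) by two
-- separate phases: collapse consecutive duplicates into the run sequence, then test
-- that the runs are pairwise distinct; objective: simpler.

-- ===== PORT A =====
-- the for-loop with break: letters = seen chars, res = 0 until the break sets it to 1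
def goA (letter : String) : List (Int × Char) → List Char → Int → Int
  | [], _, res => res
  | (idx, char) :: rest, letters, res =>
    if char ∈ letters then
      if PySem.Str.pyGet? letter (idx - 1) = some char then
        goA letter rest letters res          -- pass
      else
        res + 1                              -- res += 1; break
    else
      goA letter rest (letters ++ [char]) res

def checkGroupWord (letter : String) : Int :=
  let res := goA letter (PySem.List.enumerate letter.toList 0) [] 0
  if res ≠ 0 then 0 else 1

-- ===== PORT B =====
-- phase 1: runs.append(c) unless runs[-1] == c
def collapseStep (runs : List Char) (c : Char) : List Char :=
  if runs = [] ∨ runs.getLast? ≠ some c then runs ++ [c] else runs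

def checkGroupWord_alt (letter : String) : Int :=
  let runs := letter.toList.foldl collapseStep []
  if runs.length = (PySem.Set.ofList runs).length then 1 else 0

-- ===== PRECONDITION & SPEC =====
def Spec_checkGroupWord (letter : String) (out : Int) : Prop := out = checkGroupWord_alt letter
instance (letter : String) (out : Int) : Decidable (Spec_checkGroupWord letter out) := by unfold Spec_checkGroupWord; infer_instance

-- ===== CLAIM (what is proved, stated in full; the proofs are below) =====
def Claim_equal_checkGroupWord : Prop := ∀ (letter : String), Dom_checkGroupWord letter → Spec_checkGroupWord letter (checkGroupWord letter)

-- ===== LEMMAS AND PROOFS =====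

-- reference: the run sequence (consecutive duplicates collapsed), with the previous char as context
def collapse : Option Char → List Char → List Char
  | _, [] => []
  | prev, c :: t => if some c = prev then collapse prev t else c :: collapse (some c) t

-- reference: A's break condition — some run letter repeats an earlier run (or is in seen)
def hasDup (seen : List Char) : Option Char → List Char → Bool
  | _, [] => false
  | prev, c :: t =>
    if some c = prev then hasDup seen prev t
    else if c ∈ seen then true else hasDup (c :: seen) (some c) t

theorem foldl_collapseStep (l : List Char) (acc : List Char) :
    l.foldl collapseStep acc = acc ++ collapse acc.getLast? l := by
  induction l generalizing acc with
  | nil => simp [collapse]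
  | cons c t ih =>
    simp only [List.foldl_cons, collapseStep, collapse]
    by_cases h : acc = [] ∨ acc.getLast? ≠ some c
    · have hne : ¬ (some c = acc.getLast?) := by
        rcases h with h | h
        · simp [h]
        · exact fun hc => h hc.symm
      rw [if_pos h, if_neg hne, ih, List.getLast?_concat]
      simp
    · rw [not_or, not_not] at h
      obtain ⟨hne, hlast⟩ := h
      rw [if_neg (by simp [hlast, hne]), ih, hlast, if_pos rfl]

theorem hasDup_congr (s₁ s₂ : List Char) (prev : Option Char) (l : List Char)
    (h : ∀ c, c ∈ s₁ ↔ c ∈ s₂) : hasDup s₁ prev l = hasDup s₂ prev l := by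
  induction l generalizing s₁ s₂ prev with
  | nil => rfl
  | cons c t ih =>
    simp only [hasDup]
    by_cases hp : some c = prev
    · rw [if_pos hp, if_pos hp, ih _ _ _ h]
    · rw [if_neg hp, if_neg hp]
      by_cases hm : c ∈ s₁
      · rw [if_pos hm, if_pos ((h c).mp hm)]
      · rw [if_neg hm, if_neg (fun hc => hm ((h c).mpr hc))]
        exact ih _ _ _ (by intro x; simp [h x])

theorem hasDup_false_iff (seen : List Char) (prev : Option Char) (l : List Char) :
    hasDup seen prev l = false ↔
      (collapse prev l).Nodup ∧ ∀ c ∈ collapse prev l, c ∉ seen := by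
  induction l generalizing seen prev with
  | nil => simp [hasDup, collapse]
  | cons c t ih =>
    simp only [hasDup, collapse]
    by_cases hp : some c = prev
    · rw [if_pos hp, if_pos hp]; exact ih seen prev
    · rw [if_neg hp, if_neg hp]
      by_cases hm : c ∈ seen
      · simp [hm]
      · rw [if_neg hm, ih (c :: seen) (some c)]
        constructor
        · rintro ⟨hn, hf⟩
          refine ⟨List.nodup_cons.mpr ⟨fun hc => (hf c hc) (by simp), hn⟩, ?_⟩
          intro x hx
          rcases List.mem_cons.mp hx with rfl | hx
          · exact hm
          · exact fun hxs => (hf x hx) (List.mem_cons_of_mem _ hxs)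
        · rintro ⟨hn, hf⟩
          rcases List.nodup_cons.mp hn with ⟨hcn, hn'⟩
          refine ⟨hn', ?_⟩
          intro x hx hxs
          rcases List.mem_cons.mp hxs with rfl | hxs
          · exact hcn hx
          · exact (hf x (List.mem_cons_of_mem _ hx)) hxs

theorem length_ofList_lt (l : List Char) (h : ¬ l.Nodup) :
    (PySem.Set.ofList l).length < l.length := by
  induction l using List.reverseRecOn with
  | nil => simp at h
  | append_singleton t c ih =>
    have hof : PySem.Set.ofList (t ++ [c]) = PySem.Set.add (PySem.Set.ofList t) c := by
      simp [PySem.Set.ofList_eq_foldl]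
    by_cases hc : c ∈ t
    · have hadd : PySem.Set.add (PySem.Set.ofList t) c = PySem.Set.ofList t := by
        unfold PySem.Set.add
        rw [if_pos ((PySem.Set.contains_iff _ _).mpr ((PySem.Set.mem_ofList _ _).mpr hc))]
      have hle := PySem.Set.length_ofList_le t
      rw [hof, hadd]
      simp only [List.length_append, List.length_cons, List.length_nil]
      omega
    · have hndt : ¬ t.Nodup := by
        intro h'
        apply h
        rw [List.nodup_append]
        exact ⟨h', List.nodup_singleton c, fun a ha b hb => by
          rcases List.mem_singleton.mp hb with rfl
          exact fun hab => hc (hab ▸ ha)⟩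
      have hlt' := ih hndt
      have hle : (PySem.Set.add (PySem.Set.ofList t) c).length ≤ (PySem.Set.ofList t).length + 1 := by
        unfold PySem.Set.add
        split <;> simp
      rw [hof]
      simp only [List.length_append, List.length_cons, List.length_nil]
      omega

theorem goA_eq (letter : String) (rest p letters : List Char)
    (hs : letter.toList = p ++ rest)
    (hm : ∀ c, c ∈ letters ↔ c ∈ p) :
    goA letter (PySem.List.enumerate rest (p.length : Int)) letters 0 =
      if hasDup letters p.getLast? rest then 1 else 0 := by
  induction rest generalizing p letters with
  | nil => simp [PySem.List.enumerate_nil, goA, hasDup]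
  | cons c t ih =>
    rw [PySem.List.enumerate_cons]
    simp only [goA]
    by_cases hmem : c ∈ letters
    · have hcp : c ∈ p := (hm c).mp hmem
      have hpne : p ≠ [] := by rintro rfl; simp at hcp
      have hget : PySem.Str.pyGet? letter ((p.length : Int) - 1) = p.getLast? := by
        have hlen : 0 < p.length := List.length_pos_iff.mpr hpne
        have h1 : ((p.length : Int) - 1) = ((p.length - 1 : Nat) : Int) := by omega
        rw [h1, PySem.Str.pyGet?_natCast, hs, List.getElem?_append_left (by omega)]
        rw [List.getLast?_eq_getElem?]
      rw [if_pos hmem, hget]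
      by_cases hlast : p.getLast? = some c
      · rw [if_pos hlast]
        have hstep : hasDup letters p.getLast? (c :: t) = hasDup letters p.getLast? t := by
          simp [hasDup, hlast]
        rw [hstep]
        have hp' : letter.toList = (p ++ [c]) ++ t := by simpa using hs
        have hm' : ∀ x, x ∈ letters ↔ x ∈ p ++ [c] := by
          intro x; simp only [List.mem_append, List.mem_singleton, hm x]
          constructor
          · exact fun h => Or.inl h
          · rintro (h | rfl)
            · exact h
            · exact hcp
        have hgoal := ih (p ++ [c]) letters hp' hm'
        rw [List.getLast?_concat] at hgoal
        simp only [List.length_append, List.length_cons, List.length_nil, Nat.zero_add,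
          Nat.cast_add, Nat.cast_one] at hgoal
        rw [hgoal, hlast]
      · rw [if_neg hlast]
        have hstep : hasDup letters p.getLast? (c :: t) = true := by
          simp only [hasDup, hmem, if_true]
          rw [if_neg (fun h => hlast (Eq.symm h))]
        rw [hstep]
        norm_num
    · have hcp : c ∉ p := fun h => hmem ((hm c).mpr h)
      have hlast : ¬ (some c = p.getLast?) := by
        intro h
        exact hcp (List.mem_of_getLast? h.symm)
      rw [if_neg hmem]
      have hstep : hasDup letters p.getLast? (c :: t) = hasDup (c :: letters) (some c) t := by
        simp [hasDup, hmem, hlast]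
      rw [hstep]
      have hp' : letter.toList = (p ++ [c]) ++ t := by simpa using hs
      have hm' : ∀ x, x ∈ letters ++ [c] ↔ x ∈ p ++ [c] := by
        intro x; simp [hm x]
      have hgoal := ih (p ++ [c]) (letters ++ [c]) hp' hm'
      rw [List.getLast?_concat] at hgoal
      simp only [List.length_append, List.length_cons, List.length_nil, Nat.zero_add,
        Nat.cast_add, Nat.cast_one] at hgoal
      rw [hgoal, hasDup_congr (letters ++ [c]) (c :: letters) _ _ (by intro x; simp; tauto)]

-- ===== VERDICT (by name: the statement is the Claim_ definition above) =====
theorem checkGroupWord_spec : Claim_equal_checkGroupWord := by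
  intro letter _
  unfold Spec_checkGroupWord checkGroupWord checkGroupWord_alt
  have hA := goA_eq letter letter.toList [] [] (by simp) (by simp)
  simp only [List.length_nil, Nat.cast_zero, List.getLast?_nil] at hA
  simp only [hA, foldl_collapseStep, List.nil_append, List.getLast?_nil]
  have hiff := hasDup_false_iff [] none letter.toList
  simp only [List.not_mem_nil, not_false_iff, implies_true, and_true] at hiff
  by_cases hd : hasDup [] none letter.toList = true
  · have hnn : ¬ (collapse none letter.toList).Nodup := by
      intro hn
      rw [← hiff] at hn
      simp [hn] at hd
    have hlt := length_ofList_lt _ hnn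
    have hne : ¬ ((collapse none letter.toList).length
        = (PySem.Set.ofList (collapse none letter.toList)).length) := by omega
    rw [if_pos hd, if_neg hne]
    norm_num
  · have hn : (collapse none letter.toList).Nodup := hiff.mp (by simpa using hd)
    have heq : (collapse none letter.toList).length
        = (PySem.Set.ofList (collapse none letter.toList)).length := by
      rw [PySem.Set.ofList_eq_self_of_nodup _ hn]
    rw [if_neg hd, if_pos heq]
    norm_num
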